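-- pv_equiv track=rewrite | github.com/Paciolus/Paciolus | backend/shared/pdf_parser.py | _stitch_tables
-- ===== SOURCE A (Python) =====
-- def _normalize_row(row: list[str | None]) -> list[str]:
--     """Convert None cells to empty strings."""
--     return [cell if cell is not None else "" for cell in row]
--
-- def _rows_match(row_a: list[str], row_b: list[str]) -> bool:
--     """Check if two rows have the same content (header continuation detection)."""
--     if len(row_a) != len(row_b):
--         return False
--     return all((a or "").strip().lower() == (b or "").strip().lower() for a, b in zip(row_a, row_b))
--
-- def _stitch_tables(raw_tables: list[list[list[str | None]]]) -> tuple[list[str], list[list[str]]]: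
--     """Stitch multi-page tables into a single (headers, data_rows) result.
--
--     Strategy:
--     - If a subsequent table's first row matches the first table's header,
--       treat it as a continuation and merge data rows (skip repeated header).
--     - Otherwise, pick the largest table by row count.
--     """
--     if not raw_tables:
--         return [], []
--
--     if len(raw_tables) == 1:
--         table = raw_tables[0]
--         if len(table) < 2:
--             headers = _normalize_row(table[0]) if table else []
--             return headers, []
--         headers = _normalize_row(table[0])
--         data_rows = [_normalize_row(row) for row in table[1:]]
--         return headers, data_rows
--
--     # Use first table's first row as the reference header
--     first_table = raw_tables[0]
--     headers = _normalize_row(first_table[0])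
--     all_data_rows: list[list[str]] = [_normalize_row(row) for row in first_table[1:]]
--
--     stitched = True
--     for table in raw_tables[1:]:
--         if not table:
--             continue
--         candidate_header = _normalize_row(table[0])
--         if _rows_match(candidate_header, headers):
--             # Continuation — skip header row, append data
--             for row in table[1:]:
--                 all_data_rows.append(_normalize_row(row))
--         else:
--             # Different table structure — cannot stitch
--             stitched = False
--             break
--
--     if stitched:
--         return headers, all_data_rows
--
--     # Fallback: pick the largest table
--     largest = max(raw_tables, key=len)
--     headers = _normalize_row(largest[0])
--     data_rows = [_normalize_row(row) for row in largest[1:]]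
--     return headers, data_rows
-- ===== SOURCE B (Python) =====
-- def _normalize_row(row):
--     """Convert None cells to empty strings."""
--     return [cell if cell is not None else "" for cell in row]
--
-- def _rows_match(row_a, row_b):
--     """Check if two rows have the same content (header continuation detection)."""
--     if len(row_a) != len(row_b):
--         return False
--     return all((a or "").strip().lower() == (b or "").strip().lower() for a, b in zip(row_a, row_b))
--
-- def _stitch_tables(raw_tables):
--     if not raw_tables:
--         return [], []
--     if len(raw_tables) == 1:
--         table = raw_tables[0]
--         if not table:
--             return [], []
--         return _normalize_row(table[0]), [_normalize_row(r) for r in table[1:]]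
--     headers = _normalize_row(raw_tables[0][0])
--     continuations = [t for t in raw_tables[1:] if t]
--     if all(_rows_match(_normalize_row(t[0]), headers) for t in continuations):
--         data = [_normalize_row(r) for r in raw_tables[0][1:]]
--         for t in continuations:
--             data.extend(_normalize_row(r) for r in t[1:])
--         return headers, data
--     largest = max(raw_tables, key=len)
--     return _normalize_row(largest[0]), [_normalize_row(r) for r in largest[1:]]
-- ===== Notes on version B (the rewrite author's own statement) =====
-- stated objective: simpler
-- what changed: Replaces A's interleaved accumulate-with-flag-and-break loop by a predicate pass (all non-empty subsequent tables' first rows match the header) followed by a separate build pass, with the single-table case folded into a plain match.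
import Mathlib
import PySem

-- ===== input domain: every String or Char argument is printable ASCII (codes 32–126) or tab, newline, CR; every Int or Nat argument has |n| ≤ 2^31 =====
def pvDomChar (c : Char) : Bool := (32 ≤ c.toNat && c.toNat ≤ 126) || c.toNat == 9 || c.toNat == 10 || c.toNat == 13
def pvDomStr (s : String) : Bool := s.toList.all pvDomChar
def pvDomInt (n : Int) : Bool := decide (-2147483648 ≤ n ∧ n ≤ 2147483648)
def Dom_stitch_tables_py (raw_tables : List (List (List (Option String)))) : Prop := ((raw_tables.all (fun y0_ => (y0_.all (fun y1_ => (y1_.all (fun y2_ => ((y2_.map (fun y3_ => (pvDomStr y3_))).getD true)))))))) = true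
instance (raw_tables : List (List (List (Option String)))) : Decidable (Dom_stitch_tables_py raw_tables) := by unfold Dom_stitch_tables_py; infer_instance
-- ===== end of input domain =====

-- B replaces A's interleaved accumulate-with-flag-and-break loop by a predicate pass
-- (all non-empty continuation tables match the header) followed by a build pass; objective: simpler.

-- shared module helpers (identical in both Python sources)
def normalize_row (row : List (Option String)) : List String :=
  row.map (fun cell => match cell with | some s => s | none => "")

-- '(a or "")' on a string is a if non-empty else ""; ported literally
def rows_match (row_a row_b : List String) : Bool :=
  if row_a.length ≠ row_b.length then false
  else (row_a.zip row_b).all (fun p =>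
    PySem.Str.lower (PySem.Str.strip (if p.1 = "" then "" else p.1)) ==
    PySem.Str.lower (PySem.Str.strip (if p.2 = "" then "" else p.2)))

-- ===== PORT A =====
-- A's loop over raw_tables[1:] with the 'stitched' flag and break (once the flag is
-- false the fold passes the state through unchanged, which is the break).
def stitchStep (headers : List String) (acc : List (List String) × Bool)
    (table : List (List (Option String))) : List (List String) × Bool :=
  if acc.2 = false then acc
  else if table = [] then acc
  else if rows_match (normalize_row table.headI) headers then
    (acc.1 ++ (table.drop 1).map normalize_row, acc.2)
  else (acc.1, false)

def stitch_tables_py (raw_tables : List (List (List (Option String)))) : List String × List (List String) :=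
  if raw_tables = [] then ([], [])
  else if raw_tables.length = 1 then
    let table := raw_tables.headI
    if table.length < 2 then
      ((if table ≠ [] then normalize_row table.headI else []), [])
    else
      (normalize_row table.headI, (table.drop 1).map normalize_row)
  else
    let first_table := raw_tables.headI
    -- first_table[0] raises IndexError when first_table = []; Pre_ excludes that input
    let headers := normalize_row first_table.headI
    let st := (raw_tables.drop 1).foldl (stitchStep headers)
        ((first_table.drop 1).map normalize_row, true)
    if st.2 then (headers, st.1)
    else
      let largest := (PySem.List.max? raw_tables (fun t => t.length)).getD []
      (normalize_row largest.headI, (largest.drop 1).map normalize_row)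

-- ===== PORT B =====
def stitch_tables_py_alt (raw_tables : List (List (List (Option String)))) : List String × List (List String) :=
  match raw_tables with
  | [] => ([], [])
  | [table] =>
    if table = [] then ([], [])
    else (normalize_row table.headI, (table.drop 1).map normalize_row)
  | first :: rest =>
    -- raw_tables[0][0] raises IndexError when first = []; Pre_ excludes that input
    let headers := normalize_row first.headI
    let continuations := rest.filter (fun t => t ≠ [])
    if continuations.all (fun t => rows_match (normalize_row t.headI) headers) then
      (headers, (first.drop 1).map normalize_row ++
        continuations.flatMap (fun t => (t.drop 1).map normalize_row))
    else
      let largest := (PySem.List.max? raw_tables (fun t => t.length)).getD []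
      (normalize_row largest.headI, (largest.drop 1).map normalize_row)

-- ===== PRECONDITION & SPEC =====
-- Pre_ excludes exactly the inputs where A raises IndexError: two or more tables with
-- the first table empty (first_table[0] fails). B raises there too.
def Pre_stitch_tables_py (raw_tables : List (List (List (Option String)))) : Prop :=
  2 ≤ raw_tables.length → raw_tables.headI ≠ []
instance (raw_tables : List (List (List (Option String)))) : Decidable (Pre_stitch_tables_py raw_tables) := by unfold Pre_stitch_tables_py; infer_instance

def pvWitness_stitch_tables_py : List (List (List (Option String))) :=
  [[[some "h", none], [some "1", some "2"]], [[some " H ", some ""], [none, some "x"]]]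

def Spec_stitch_tables_py (raw_tables : List (List (List (Option String)))) (out : List String × List (List String)) : Prop := out = stitch_tables_py_alt raw_tables
instance (raw_tables : List (List (List (Option String)))) (out : List String × List (List String)) : Decidable (Spec_stitch_tables_py raw_tables out) := by unfold Spec_stitch_tables_py; infer_instance

-- ===== CLAIM (what is proved, stated in full; the proofs are below) =====
def Claim_equal_stitch_tables_py : Prop := ∀ (raw_tables : List (List (List (Option String)))), Dom_stitch_tables_py raw_tables → Pre_stitch_tables_py raw_tables → Spec_stitch_tables_py raw_tables (stitch_tables_py raw_tables)

-- ===== LEMMAS AND PROOFS =====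

-- once the flag is false, the fold is the identity (A's break)
theorem stitchStep_false (headers : List String) (ts : List (List (List (Option String))))
    (acc : List (List String)) :
    ts.foldl (stitchStep headers) (acc, false) = (acc, false) := by
  induction ts with
  | nil => rfl
  | cons t ts ih => simpa [stitchStep] using ih

-- characterisation of A's fold: flag true iff every non-empty table matches, and then
-- the accumulator is the initial rows followed by the data of the non-empty tables.
theorem stitchStep_foldl (headers : List String) (ts : List (List (List (Option String))))
    (acc : List (List String)) :
    ts.foldl (stitchStep headers) (acc, true) =
      if (ts.filter (fun t => t ≠ [])).all (fun t => rows_match (normalize_row t.headI) headers) then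
        (acc ++ (ts.filter (fun t => t ≠ [])).flatMap (fun t => (t.drop 1).map normalize_row), true)
      else (((ts.takeWhile (fun t => t = [] || rows_match (normalize_row t.headI) headers)).filter
              (fun t => t ≠ [])).foldl (fun a t => a ++ (t.drop 1).map normalize_row) acc, false) := by
  induction ts generalizing acc with
  | nil => simp
  | cons t ts ih =>
    by_cases ht : t = []
    · subst ht
      simpa [stitchStep, List.takeWhile] using ih acc
    · by_cases hm : rows_match (normalize_row t.headI) headers
      · rw [List.foldl_cons]
        have hstep : stitchStep headers (acc, true) t = (acc ++ (t.drop 1).map normalize_row, true) := by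
          simp [stitchStep, ht, hm]
        rw [hstep, ih]
        simp [ht, hm, List.takeWhile, List.flatMap_cons, List.append_assoc]
      · simp [stitchStep, ht, hm, stitchStep_false, List.takeWhile]

-- ===== VERDICT (by name: the statement is the Claim_ definition above) =====
theorem stitch_tables_py_spec : Claim_equal_stitch_tables_py := by
  intro raw_tables _ hpre
  unfold Spec_stitch_tables_py
  match raw_tables with
  | [] => rfl
  | [table] =>
    match table with
    | [] => rfl
    | [r] => simp [stitch_tables_py, stitch_tables_py_alt]
    | r :: s :: ts =>
      simp only [stitch_tables_py, stitch_tables_py_alt]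
      simp
  | first :: t2 :: rest =>
    simp only [stitch_tables_py, stitch_tables_py_alt]
    rw [if_neg (by simp : ¬ (first :: t2 :: rest) = []),
        if_neg (by simp : ¬ (first :: t2 :: rest).length = 1)]
    simp only [List.drop_succ_cons, List.drop_zero, List.headI_cons]
    rw [stitchStep_foldl]
    rcases Bool.eq_false_or_eq_true (((t2 :: rest).filter (fun t => t ≠ [])).all
        (fun t => rows_match (normalize_row t.headI) (normalize_row first.headI))) with h | h
    · simp only [h]
      simp
    · simp only [h]
      simp
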